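-- pv_equiv track=rewrite | github.com/CODE-U-S/Coding_Test_Study | 2st/Riyeon/외계어 사전.py | solution
-- ===== SOURCE A (Python) =====
-- def solution(spell, dic):
--     for d in dic:
--         cnt = 0
--         for i in spell:
--             if i in d:
--                 cnt += 1
--         if cnt == len(spell):
--             return 1
--     return 2
-- ===== SOURCE B (Python) =====
-- def solution(spell, dic):
--     candidates = dic
--     for s in spell:
--         candidates = [d for d in candidates if s in d]
--     return 1 if candidates else 2
-- ===== Notes on version B (the rewrite author's own statement) =====
-- stated objective: faster
-- what changed: Inverts the loop nesting: instead of counting, per dictionary word, how many spell strings it contains, B iterates over the spell strings and progressively filters the dictionary down to surviving candidate words (a word missing one spell string is dropped and never retested), answering 1 iff the final candidate list is nonempty.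
import Mathlib
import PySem

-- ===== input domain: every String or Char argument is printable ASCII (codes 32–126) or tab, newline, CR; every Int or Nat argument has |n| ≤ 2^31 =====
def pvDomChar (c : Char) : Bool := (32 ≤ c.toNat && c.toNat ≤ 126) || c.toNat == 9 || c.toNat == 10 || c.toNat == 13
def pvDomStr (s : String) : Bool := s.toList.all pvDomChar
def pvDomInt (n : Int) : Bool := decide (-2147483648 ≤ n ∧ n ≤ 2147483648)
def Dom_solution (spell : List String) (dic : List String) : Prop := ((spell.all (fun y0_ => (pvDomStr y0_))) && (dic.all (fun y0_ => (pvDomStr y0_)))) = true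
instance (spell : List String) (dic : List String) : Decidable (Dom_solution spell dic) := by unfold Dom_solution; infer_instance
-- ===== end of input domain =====

-- B inverts the loop nesting: it iterates over the spell strings, progressively filtering
-- the dictionary down to candidate words, and answers from the final list; same return value.

-- ===== PORT A =====
-- outer loop over dic with early return 1; inner loop counts spell strings occurring in d
def solutionGo (spell : List String) (dic : List String) : Int :=
  match dic with
  | [] => 2
  | d :: rest =>
      let cnt := spell.foldl (fun c i => if PySem.Str.isIn i d then c + 1 else c) 0
      if cnt = spell.length then 1 else solutionGo spell rest

def solution (spell : List String) (dic : List String) : Int :=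
  solutionGo spell dic

-- ===== PORT B =====
-- for s in spell: candidates = [d for d in candidates if s in d]; then truthiness of the list
def solution_alt (spell : List String) (dic : List String) : Int :=
  let candidates := spell.foldl (fun cand s => cand.filter (fun d => PySem.Str.isIn s d)) dic
  if candidates = [] then 2 else 1

-- ===== PRECONDITION & SPEC =====
def Spec_solution (spell : List String) (dic : List String) (out : Int) : Prop := out = solution_alt spell dic
instance (spell : List String) (dic : List String) (out : Int) : Decidable (Spec_solution spell dic out) := by unfold Spec_solution; infer_instance

-- ===== CLAIM (what is proved, stated in full; the proofs are below) =====
def Claim_equal_solution : Prop := ∀ (spell : List String) (dic : List String), Dom_solution spell dic → Spec_solution spell dic (solution spell dic)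

-- ===== LEMMAS AND PROOFS =====

-- A's inner counter is a countP
theorem foldl_count {α : Type} (p : α → Bool) (l : List α) (n : Nat) :
    l.foldl (fun c i => if p i then c + 1 else c) n = n + l.countP p := by
  induction l generalizing n with
  | nil => simp
  | cons x xs ih =>
      cases hp : p x <;> simp [hp, ih] <;> try omega

-- B's staged filtering collapses to one filter with the conjunction of all tests
theorem foldl_filter_eq {α β : Type} (q : α → β → Bool) (spell : List α) (dic : List β) :
    spell.foldl (fun cand s => cand.filter (fun d => q s d)) dic
      = dic.filter (fun d => spell.all (fun s => q s d)) := by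
  induction spell generalizing dic with
  | nil => simp
  | cons s ss ih =>
      simp only [List.foldl_cons, ih, List.filter_filter]
      exact List.filter_congr (fun d _ => by simp [Bool.and_comm])

theorem solutionGo_eq_any (spell : List String) (dic : List String) :
    solutionGo spell dic
      = (if dic.any (fun d => spell.all (fun s => PySem.Str.isIn s d)) then 1 else 2) := by
  induction dic with
  | nil => rfl
  | cons d rest ih =>
      rw [show solutionGo spell (d :: rest)
            = (if spell.foldl (fun c i => if PySem.Str.isIn i d then c + 1 else c) 0
                  = spell.length then 1 else solutionGo spell rest) from rfl,
          foldl_count, Nat.zero_add, ih]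
      have hiff : (spell.countP (fun i => PySem.Str.isIn i d) = spell.length)
          ↔ (spell.all (fun s => PySem.Str.isIn s d) = true) := by
        rw [List.countP_eq_length, List.all_eq_true]
      cases hb : spell.all (fun s => PySem.Str.isIn s d) with
      | true =>
          rw [if_pos (hiff.mpr hb), List.any_cons, hb, Bool.true_or, if_pos rfl]
      | false =>
          rw [if_neg (fun hc => by rw [hiff.mp hc] at hb; cases hb),
              List.any_cons, hb, Bool.false_or]

-- ===== VERDICT (by name: the statement is the Claim_ definition above) =====
theorem solution_spec : Claim_equal_solution := by
  intro spell dic _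
  show solution spell dic = solution_alt spell dic
  rw [show solution spell dic = solutionGo spell dic from rfl, solutionGo_eq_any,
      show solution_alt spell dic
        = (if spell.foldl (fun cand s => cand.filter (fun d => PySem.Str.isIn s d)) dic = []
           then 2 else 1) from rfl,
      foldl_filter_eq]
  by_cases hf : List.filter (fun d => spell.all fun s => PySem.Str.isIn s d) dic = []
  · rw [if_pos hf, if_neg]
    intro hb
    obtain ⟨d, hd, hall⟩ := List.any_eq_true.mp hb
    exact (List.filter_eq_nil_iff.mp hf) d hd hall
  · rw [if_neg hf, if_pos]
    obtain ⟨d, hd⟩ := List.exists_mem_of_ne_nil _ hf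
    obtain ⟨hmem, hall⟩ := List.mem_filter.mp hd
    exact List.any_eq_true.mpr ⟨d, hmem, hall⟩
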